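-- pv_equiv track=rewrite | github.com/hidenaka/ekikyou--DB-henka | analysis/phase2/basic_stats.py | cross_tab_2d
-- ===== SOURCE A (Python) =====
-- from collections import Counter, defaultdict
--
-- def cross_tab_2d(records, var1, var2):
--     table = defaultdict(lambda: defaultdict(int))
--     for r in records:
--         v1 = r.get(var1)
--         v2 = r.get(var2)
--         if v1 and v2:
--             table[v1][v2] += 1
--     # Convert to regular dict
--     return {k: dict(v) for k, v in table.items()}
-- ===== SOURCE B (Python) =====
-- from collections import Counter
--
-- def cross_tab_2d(records, var1, var2):
--     pairs = [(r.get(var1), r.get(var2)) for r in records]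
--     pairs = [(a, b) for a, b in pairs if a and b]
--     result = {}
--     for a in dict.fromkeys(a for a, _ in pairs):
--         result[a] = dict(Counter(b for x, b in pairs if x == a))
--     return result
-- ===== Notes on version B (the rewrite author's own statement) =====
-- stated objective: alternative
-- what changed: Replaces A's single-pass nested defaultdict (incrementing table[v1][v2] per record) by a two-phase group-by: extract the filtered (v1, v2) pair list once, then build the result as one Counter of the v2's per distinct v1 in first-appearance order.
import Mathlib
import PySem

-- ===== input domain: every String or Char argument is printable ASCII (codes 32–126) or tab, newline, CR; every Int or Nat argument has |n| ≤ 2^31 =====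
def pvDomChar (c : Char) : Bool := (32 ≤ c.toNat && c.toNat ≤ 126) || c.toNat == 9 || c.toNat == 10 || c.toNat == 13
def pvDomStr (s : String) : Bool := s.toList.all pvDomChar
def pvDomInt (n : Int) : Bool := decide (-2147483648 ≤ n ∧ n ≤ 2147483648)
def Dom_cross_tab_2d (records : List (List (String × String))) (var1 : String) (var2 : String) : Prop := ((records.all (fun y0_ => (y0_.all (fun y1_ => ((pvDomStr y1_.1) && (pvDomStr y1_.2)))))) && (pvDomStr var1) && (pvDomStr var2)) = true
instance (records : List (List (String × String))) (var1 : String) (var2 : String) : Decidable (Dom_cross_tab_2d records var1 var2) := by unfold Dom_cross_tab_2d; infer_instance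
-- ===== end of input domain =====

-- B replaces A's incremental nested-defaultdict build by a two-phase group-by
-- (extract the filtered pair list, then one Counter per distinct first key):
-- an alternative decomposition of the same cross-tabulation, not faster.

-- ===== PORT A =====
def cross_tab_2d (records : List (List (String × String))) (var1 : String) (var2 : String) : List (String × List (String × Int)) :=
  -- table = defaultdict(lambda: defaultdict(int)); table[v1][v2] += 1 is a
  -- modify-with-default at v1 applying a modify-with-default at v2 (exact).
  let table : PySem.Dict String (PySem.Dict String Int) :=
    records.foldl (fun table r =>
      let v1 := (PySem.Dict.mk r).get? var1
      let v2 := (PySem.Dict.mk r).get? var2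
      match v1, v2 with
      | some a, some b =>
          -- `if v1 and v2`: both keys present with non-empty values (str truthiness)
          if a ≠ "" ∧ b ≠ "" then
            table.modify a PySem.Dict.empty (fun inner => inner.modify b 0 (· + 1))
          else table
      | _, _ => table) PySem.Dict.empty
  -- {k: dict(v) for k, v in table.items()}: the keys are already distinct, so
  -- the dict comprehension is a map over the items in insertion order (exact).
  table.items.map (fun p => (p.1, p.2.items))

-- ===== PORT B =====
def cross_tab_2d_alt (records : List (List (String × String))) (var1 : String) (var2 : String) : List (String × List (String × Int)) :=
  let pairs0 := records.map (fun r => ((PySem.Dict.mk r).get? var1, (PySem.Dict.mk r).get? var2))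
  -- `if a and b`: str truthiness; None and '' are falsy, encoded via getD ""
  let pairs : List (String × String) := pairs0.filterMap (fun q =>
    if q.1.getD "" ≠ "" ∧ q.2.getD "" ≠ "" then some (q.1.getD "", q.2.getD "") else none)
  -- dict.fromkeys(...) = ordered dedup; result[a] = dict(Counter(...)); result's
  -- keys are the distinct a's in that order, so the built dict is this map (exact).
  (PySem.List.dedup (pairs.map (·.1))).map (fun a =>
    (a, (PySem.Dict.counter ((pairs.filter (fun p => p.1 == a)).map (·.2))).items))

-- ===== PRECONDITION & SPEC =====
def Spec_cross_tab_2d (records : List (List (String × String))) (var1 : String) (var2 : String) (out : List (String × List (String × Int))) : Prop := out = cross_tab_2d_alt records var1 var2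
instance (records : List (List (String × String))) (var1 : String) (var2 : String) (out : List (String × List (String × Int))) : Decidable (Spec_cross_tab_2d records var1 var2 out) := by unfold Spec_cross_tab_2d; infer_instance

-- ===== CLAIM (what is proved, stated in full; the proofs are below) =====
def Claim_equal_cross_tab_2d : Prop := ∀ (records : List (List (String × String))) (var1 : String) (var2 : String), Dom_cross_tab_2d records var1 var2 → Spec_cross_tab_2d records var1 var2 (cross_tab_2d records var1 var2)

-- ===== LEMMAS AND PROOFS =====

-- the per-record pair extraction both programs perform
def pvGetPair (var1 var2 : String) (r : List (String × String)) : Option (String × String) :=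
  match (PySem.Dict.mk r).get? var1, (PySem.Dict.mk r).get? var2 with
  | some a, some b => if a ≠ "" ∧ b ≠ "" then some (a, b) else none
  | _, _ => none

-- A's loop body, as a step over an extracted pair
def pvStep (t : PySem.Dict String (PySem.Dict String Int)) (p : String × String) : PySem.Dict String (PySem.Dict String Int) :=
  t.modify p.1 PySem.Dict.empty (fun inner => inner.modify p.2 0 (· + 1))

-- A's nested table, built from the extracted pair list
def pvNB (ps : List (String × String)) : PySem.Dict String (PySem.Dict String Int) :=
  ps.foldl pvStep PySem.Dict.empty

-- A's fold over records is pvNB of the extracted pair list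
theorem pvFoldEq (var1 var2 : String) (records : List (List (String × String))) (t : PySem.Dict String (PySem.Dict String Int)) :
    records.foldl (fun table r =>
      match (PySem.Dict.mk r).get? var1, (PySem.Dict.mk r).get? var2 with
      | some a, some b =>
          if a ≠ "" ∧ b ≠ "" then
            table.modify a PySem.Dict.empty (fun inner => inner.modify b 0 (· + 1))
          else table
      | _, _ => table) t
    = (records.filterMap (pvGetPair var1 var2)).foldl pvStep t := by
  induction records generalizing t with
  | nil => rfl
  | cons r rs ih =>
      simp only [List.foldl_cons, List.filterMap_cons]
      cases h1 : (PySem.Dict.mk r).get? var1 <;> cases h2 : (PySem.Dict.mk r).get? var2 <;>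
        simp only [pvGetPair, h1, h2, ih]
      split_ifs <;> simp [pvStep]

-- B's pair list is the same extraction
theorem pvPairsEq (var1 var2 : String) (records : List (List (String × String))) :
    (records.map (fun r => ((PySem.Dict.mk r).get? var1, (PySem.Dict.mk r).get? var2))).filterMap (fun q =>
      if q.1.getD "" ≠ "" ∧ q.2.getD "" ≠ "" then some (q.1.getD "", q.2.getD "") else none)
    = records.filterMap (pvGetPair var1 var2) := by
  rw [List.filterMap_map]
  apply List.filterMap_congr
  intro r _
  simp only [Function.comp, pvGetPair]
  cases (PySem.Dict.mk r).get? var1 <;> cases (PySem.Dict.mk r).get? var2 <;> simp [Option.getD]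

-- inserting into an (inner) dict adds its key to the key list, set-style
theorem pvKeysInsert (d : PySem.Dict String Int) (k : String) (v : Int) :
    (d.insert k v).keys = PySem.Set.add d.keys k := by
  by_cases h : d.contains k = true
  · rw [PySem.Dict.keys_insert_of_contains d v h]
    have hm : k ∈ d.keys := (PySem.Dict.contains_iff_mem_keys d k).mp h
    simp [PySem.Set.add, hm]
  · rw [PySem.Dict.keys_insert_of_not_contains d v (by simpa using h)]
    have hm : k ∉ d.keys := fun hc => h ((PySem.Dict.contains_iff_mem_keys d k).mpr hc)
    simp [PySem.Set.add, hm]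

-- outer keys of the nested table: the distinct first components, first-appearance order
theorem pvKeysNB (ps : List (String × String)) :
    (pvNB ps).keys = PySem.Set.ofList (ps.map (·.1)) :=
  (PySem.Dict.keys_foldl_modify_key ps (fun p => p.1) PySem.Dict.empty
    (fun _ p => fun inner => inner.modify p.2 0 (· + 1)) PySem.Dict.empty).trans rfl

theorem pvNodupKeysNB (ps : List (String × String)) : (pvNB ps).keys.Nodup := by
  rw [pvKeysNB]; exact PySem.Set.nodup_ofList _

-- inner keys at a: the distinct seconds of pairs with first a, first-appearance order
theorem pvInnerKeys (ps : List (String × String)) (a : String) :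
    ((pvNB ps).getD a PySem.Dict.empty).keys
      = PySem.Set.ofList ((ps.filter (fun p => p.1 == a)).map (·.2)) := by
  induction ps using List.reverseRecOn with
  | nil => rfl
  | append_singleton l p ih =>
      simp only [pvNB, List.foldl_append, List.foldl_cons, List.foldl_nil] at ih ⊢
      rw [List.filter_append, List.map_append]
      simp only [pvStep]
      rw [PySem.Dict.getD_modify]
      by_cases ha : a = p.1
      · subst ha
        rw [if_pos rfl, PySem.Dict.keys_modify, pvKeysInsert, ih]
        simp [PySem.Set.ofList, List.foldl_append, List.filter]
      · rw [if_neg ha, ih]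
        have : (p.1 == a) = false := by simpa using fun h => ha h.symm
        simp [List.filter, this]
-- inner value at (a, b): the multiplicity of b among those seconds
theorem pvInnerVal (ps : List (String × String)) (a b : String) :
    (((pvNB ps).getD a PySem.Dict.empty).getD b 0)
      = (((ps.filter (fun p => p.1 == a)).map (·.2)).count b : Int) := by
  induction ps using List.reverseRecOn with
  | nil => rfl
  | append_singleton l p ih =>
      simp only [pvNB, List.foldl_append, List.foldl_cons, List.foldl_nil] at ih ⊢
      rw [List.filter_append, List.map_append]
      simp only [pvStep]
      rw [PySem.Dict.getD_modify]
      by_cases ha : a = p.1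
      · subst ha
        rw [if_pos rfl, PySem.Dict.getD_modify]
        by_cases hb : b = p.2
        · subst hb
          rw [if_pos rfl, ih]
          simp [List.filter, List.count_append]
        · rw [if_neg hb, ih]
          have : (p.2 == b) = false := by simpa using fun h => hb h.symm
          simp [List.filter, List.count_append, List.count_singleton, this]
      · rw [if_neg ha, ih]
        have : (p.1 == a) = false := by simpa using fun h => ha h.symm
        simp [List.filter, this]

-- ===== VERDICT (by name: the statement is the Claim_ definition above) =====
theorem cross_tab_2d_spec : Claim_equal_cross_tab_2d := by
  intro records var1 var2 _
  show cross_tab_2d records var1 var2 = cross_tab_2d_alt records var1 var2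
  simp only [cross_tab_2d, cross_tab_2d_alt]
  rw [pvFoldEq, pvPairsEq]
  set ps := records.filterMap (pvGetPair var1 var2) with hps
  have hnb : List.foldl pvStep PySem.Dict.empty ps = pvNB ps := rfl
  rw [hnb]
  rw [PySem.Dict.items_eq_map_keys (pvNB ps) (pvNodupKeysNB ps) PySem.Dict.empty]
  rw [List.map_map, pvKeysNB]
  have hded : PySem.List.dedup (ps.map (·.1)) = PySem.Set.ofList (ps.map (·.1)) := rfl
  rw [hded]
  apply List.map_congr_left
  intro a _
  simp only [Function.comp]
  refine congrArg (fun z => (a, z)) ?_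
  rw [PySem.Dict.items_eq_map_keys ((pvNB ps).getD a PySem.Dict.empty)
        (by rw [pvInnerKeys]; exact PySem.Set.nodup_ofList _) 0, pvInnerKeys,
      PySem.Dict.items_counter]
  apply List.map_congr_left
  intro b _
  rw [pvInnerVal]
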